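-- pv_equiv track=rewrite | github.com/katsuya174-sketch/rumilog | app.py | get_availability_score
-- ===== SOURCE A (Python) =====
-- def normalize_text(value):
--     if value is None:
--         return ""
--     return str(value).strip().lower()
--
-- def get_availability_score(values):
--     """
--     availability_japan 用
--     日本での買いやすさ加点
--     DB例:
--     ["amazon", "rakuten", "qoo10", "drugstore"]
--     """
--     if not isinstance(values, list):
--         return 0
--
--     score = 0
--     normalized = [normalize_text(v) for v in values]
--
--     if "drugstore" in normalized:
--         score += 4
--     if "variety_shop" in normalized:
--         score += 4
--     if "amazon" in normalized:
--         score += 2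
--     if "rakuten" in normalized:
--         score += 2
--     if "qoo10" in normalized:
--         score += 2
--     if "official" in normalized:
--         score += 2
--
--     return score
-- ===== SOURCE B (Python) =====
-- WEIGHTS = {
--     "drugstore": 4,
--     "variety_shop": 4,
--     "amazon": 2,
--     "rakuten": 2,
--     "qoo10": 2,
--     "official": 2,
-- }
--
-- def normalize_text(value):
--     if value is None:
--         return ""
--     return str(value).strip().lower()
--
-- def get_availability_score(values):
--     if not isinstance(values, list):
--         return 0
--     pending = dict(WEIGHTS)
--     score = 0
--     for v in values:
--         if not pending:
--             break
--         w = pending.pop(normalize_text(v), None)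
--         if w is not None:
--             score += w
--     return score
-- ===== Notes on version B (the rewrite author's own statement) =====
-- stated objective: alternative
-- what changed: Instead of normalizing the whole list and scanning it once per keyword, B makes a single pass over the values, popping each normalized value's weight from a pending weight table (so duplicates count once) and stopping early once the table is exhausted.
import Mathlib
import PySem

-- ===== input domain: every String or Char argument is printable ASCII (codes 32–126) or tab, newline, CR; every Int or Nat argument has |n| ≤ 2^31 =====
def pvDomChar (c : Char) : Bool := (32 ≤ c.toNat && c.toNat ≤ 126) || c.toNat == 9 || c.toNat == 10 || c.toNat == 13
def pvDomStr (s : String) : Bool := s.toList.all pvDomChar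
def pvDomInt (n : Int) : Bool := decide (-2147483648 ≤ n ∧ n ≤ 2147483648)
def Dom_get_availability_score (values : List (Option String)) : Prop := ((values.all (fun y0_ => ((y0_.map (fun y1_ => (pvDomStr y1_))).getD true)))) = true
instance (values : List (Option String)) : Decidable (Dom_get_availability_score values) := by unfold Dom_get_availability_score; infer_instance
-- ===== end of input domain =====

-- B replaces A's six separate membership scans of the normalized list by a single pass over
-- the values that pops each normalized value's weight from a pending weight table and stops
-- early once the table is empty (objective: alternative).

-- shared same-module helper normalize_text (None -> "", else str(v).strip().lower())
def normalize_text (value : Option String) : String :=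
  match value with
  | none => ""
  | some s => PySem.Str.lower (PySem.Str.strip s)

-- ===== PORT A =====
def get_availability_score (values : List (Option String)) : Int :=
  -- isinstance(values, list) is always true under the type convention
  let score : Int := 0
  let normalized := values.map (fun v => normalize_text v)
  let score := if normalized.contains "drugstore" then score + 4 else score
  let score := if normalized.contains "variety_shop" then score + 4 else score
  let score := if normalized.contains "amazon" then score + 2 else score
  let score := if normalized.contains "rakuten" then score + 2 else score
  let score := if normalized.contains "qoo10" then score + 2 else score
  let score := if normalized.contains "official" then score + 2 else score
  score

-- ===== PORT B =====
def WEIGHTS : PySem.Dict String Int :=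
  PySem.Dict.ofList [("drugstore", 4), ("variety_shop", 4), ("amazon", 2),
                     ("rakuten", 2), ("qoo10", 2), ("official", 2)]

-- the for-loop of Source B: state = (pending, score); 'if not pending: break'; pending.pop(k, None)
def avail_loop (l : List (Option String)) (pending : PySem.Dict String Int) (score : Int) : Int :=
  match l with
  | [] => score
  | v :: t =>
    if pending.items.isEmpty then score
    else
      match pending.pop? (normalize_text v) with
      | some (w, pending') => avail_loop t pending' (score + w)
      | none => avail_loop t pending score

def get_availability_score_alt (values : List (Option String)) : Int :=
  avail_loop values WEIGHTS 0

-- ===== PRECONDITION & SPEC =====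
def Spec_get_availability_score (values : List (Option String)) (out : Int) : Prop := out = get_availability_score_alt values
instance (values : List (Option String)) (out : Int) : Decidable (Spec_get_availability_score values out) := by unfold Spec_get_availability_score; infer_instance

-- ===== CLAIM (what is proved, stated in full; the proofs are below) =====
def Claim_equal_get_availability_score : Prop := ∀ (values : List (Option String)), Dom_get_availability_score values → Spec_get_availability_score values (get_availability_score values)

-- ===== LEMMAS AND PROOFS =====

-- weight of one pending entry under the set of normalized values still to come
def pendVal (lm : List String) (kv : String × Int) : Int :=
  if kv.1 ∈ lm then kv.2 else 0

-- splitting the pending sum at the unique entry with key n (keys are nodup)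
theorem sum_pop (items : List (String × Int)) (n : String) (w : Int) (tm : List String)
    (hnd : (items.map Prod.fst).Nodup)
    (hf : items.find? (fun p => p.1 == n) = some (n, w)) :
    (items.map (pendVal (n :: tm))).sum
      = w + ((items.filter (fun p => !(p.1 == n))).map (pendVal tm)).sum := by
  induction items with
  | nil => simp at hf
  | cons kv rest ih =>
    rcases kv with ⟨k, v⟩
    simp only [List.map_cons, List.nodup_cons] at hnd
    by_cases hk : k = n
    · subst hk
      have hfv : v = w := by simpa [List.find?] using hf
      subst hfv
      have hrest : ∀ p ∈ rest, p.1 ≠ k := by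
        intro p hp hpk
        exact hnd.1 (hpk ▸ List.mem_map_of_mem hp)
      have hmap : rest.map (pendVal (k :: tm)) = rest.map (pendVal tm) := by
        apply List.map_congr_left
        intro p hp
        simp [pendVal, hrest p hp]
      have hfilt : rest.filter (fun p => !(p.1 == k)) = rest := by
        apply List.filter_eq_self.mpr
        intro p hp; simp [hrest p hp]
      simp [pendVal, hmap, hfilt]
    · have hkb : (k == n) = false := by simp [hk]
      have hf' : rest.find? (fun p => p.1 == n) = some (n, w) := by
        simpa [List.find?, hkb] using hf
      have ih' := ih hnd.2 hf'
      simp only [List.filter_cons, hkb, Bool.not_false, if_pos, List.map_cons,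
        List.sum_cons, ih']
      have hv : pendVal (n :: tm) (k, v) = pendVal tm (k, v) := by
        simp [pendVal, hk]
      rw [hv]; ring

-- loop invariant: the loop adds, for each still-pending entry whose key occurs among the
-- normalized remaining values, that entry's weight
theorem avail_loop_eq (l : List (Option String)) (p : PySem.Dict String Int) (s : Int)
    (hnd : (p.items.map Prod.fst).Nodup) :
    avail_loop l p s = s + (p.items.map (pendVal (l.map normalize_text))).sum := by
  induction l generalizing p s with
  | nil =>
    have h0 : p.items.map (pendVal []) = p.items.map (fun _ => (0 : Int)) := by
      apply List.map_congr_left; intro kv _; simp [pendVal]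
    simp [avail_loop, h0]
  | cons v t ih =>
    by_cases hemp : p.items.isEmpty
    · have h0 : p.items = [] := by simpa [List.isEmpty_iff] using hemp
      simp [avail_loop, h0]
    · rcases hg : p.get? (normalize_text v) with _ | w
      · -- key absent: the entry sum is unchanged by dropping this value
        rw [avail_loop, if_neg hemp, PySem.Dict.pop?, hg]
        show avail_loop t p s = _
        have hfind : p.items.find? (fun q => q.1 == normalize_text v) = none := by
          simpa [PySem.Dict.get?] using hg
        have habs : ∀ q ∈ p.items, q.1 ≠ normalize_text v := by
          intro q hq hqn
          have := List.find?_eq_none.mp hfind q hq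
          simp [hqn] at this
        have hmap : p.items.map (pendVal (normalize_text v :: t.map normalize_text))
            = p.items.map (pendVal (t.map normalize_text)) := by
          apply List.map_congr_left
          intro q hq; simp [pendVal, habs q hq]
        rw [ih p s hnd, List.map_cons, hmap]
      · -- key present: its weight is scored and its entry leaves the pending table
        rw [avail_loop, if_neg hemp, PySem.Dict.pop?, hg]
        show avail_loop t (p.erase (normalize_text v)) (s + w) = _
        have hfind : p.items.find? (fun q => q.1 == normalize_text v) = some (normalize_text v, w) := by
          rw [PySem.Dict.get?] at hg
          rcases hfq : p.items.find? (fun q => q.1 == normalize_text v) with _ | q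
          · simp [hfq] at hg
          · obtain ⟨q1, q2⟩ := q
            have hq1 : q1 = normalize_text v := by
              have := List.find?_some hfq; simpa using this
            have hq2 : q2 = w := by simpa [hfq] using hg
            rw [hfq, hq1, hq2]
        have hitems' : (p.erase (normalize_text v)).items
            = p.items.filter (fun q => !(q.1 == normalize_text v)) := rfl
        have hnd' : ((p.erase (normalize_text v)).items.map Prod.fst).Nodup := by
          rw [hitems']
          exact List.Nodup.sublist (List.filter_sublist.map Prod.fst) hnd
        rw [ih _ (s + w) hnd', hitems', List.map_cons,
          sum_pop p.items (normalize_text v) w (t.map normalize_text) hnd hfind]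
        ring

-- ===== VERDICT (by name: the statement is the Claim_ definition above) =====
theorem get_availability_score_spec : Claim_equal_get_availability_score := by
  intro values _
  unfold Spec_get_availability_score
  show _ = get_availability_score_alt values
  unfold get_availability_score get_availability_score_alt
  rw [avail_loop_eq values WEIGHTS 0 (by decide)]
  have hw : WEIGHTS.items = [("drugstore", (4:Int)), ("variety_shop", 4), ("amazon", 2),
      ("rakuten", 2), ("qoo10", 2), ("official", 2)] := by decide
  rw [hw]
  simp only [List.map_cons, List.map_nil, List.sum_cons, List.sum_nil, pendVal,
    List.contains_iff_mem]
  split_ifs <;> omega
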